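-- pv_equiv track=rewrite | github.com/DungNguyenCoder/Python_PTIT | PY01043 so thuan nghich chan.py | generate_even_palindromes
-- ===== SOURCE A (Python) =====
-- def generate_even_palindromes(limit):
--     digits = ['0', '2', '4', '6', '8']
--     results = []
--     max_len = len(str(limit))
--
--     for length in range(2, max_len + 1, 2):
--         half_len = length // 2
--
--         def backtrack(cur):
--             if len(cur) == half_len:
--                 left = ''.join(cur)
--                 num = int(left + left[::-1])
--                 if num < limit:
--                     results.append(num)
--                 return
--             for d in digits:
--                 if len(cur) == 0 and d == '0':
--                     continue
--                 cur.append(d)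
--                 backtrack(cur)
--                 cur.pop()
--
--         backtrack([])
--     return results
-- ===== SOURCE B (Python) =====
-- def generate_even_palindromes(limit):
--     results = []
--     max_len = len(str(limit))
--     for length in range(2, max_len + 1, 2):
--         half_len = length // 2
--         halves = ['2', '4', '6', '8']
--         for _ in range(half_len - 1):
--             halves = [h + d for h in halves for d in '02468']
--         for left in halves:
--             num = int(left + left[::-1])
--             if num < limit:
--                 results.append(num)
--     return results
-- ===== Notes on version B (the rewrite author's own statement) =====
-- stated objective: alternative
-- what changed: The per-call recursive backtracking closure with a shared mutable accumulator is replaced by a breadth-wise construction: the list of left halves is built level by level via repeated cartesian extension (list comprehension), then a single flat pass forms each palindrome and filters it against the limit.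
import Mathlib
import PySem

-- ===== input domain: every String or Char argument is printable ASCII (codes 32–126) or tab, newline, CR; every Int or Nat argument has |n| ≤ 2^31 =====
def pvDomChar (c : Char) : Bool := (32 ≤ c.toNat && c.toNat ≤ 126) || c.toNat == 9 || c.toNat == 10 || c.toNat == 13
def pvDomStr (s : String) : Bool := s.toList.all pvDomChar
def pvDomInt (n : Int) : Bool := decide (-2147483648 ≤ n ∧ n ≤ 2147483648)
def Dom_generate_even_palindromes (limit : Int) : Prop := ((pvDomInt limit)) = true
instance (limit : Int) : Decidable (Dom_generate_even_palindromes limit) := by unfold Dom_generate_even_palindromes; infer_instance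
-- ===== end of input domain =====

-- B replaces A's per-call recursive backtracking closure by a breadth-wise cartesian
-- construction of the left halves followed by one flat filtering pass (objective: alternative).

-- ===== PORT A =====
-- digits = ['0', '2', '4', '6', '8']
def pvDigitsA : List Char := ['0', '2', '4', '6', '8']

-- backtrack(cur): the fuel argument is half_len - len(cur) (the number of digits still to
-- choose), so fuel 0 is exactly Python's len(cur) == half_len case; the recursion is
-- otherwise step for step A's. PySem.Int.ofStr? is always `some` here (nonempty digit
-- string), .getD 0 only discharges the Option.
def pvBacktrackA (limit : Int) : Nat → List Char → List Int → List Int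
  | 0, cur, results =>
      let left := String.ofList cur
      let num := (PySem.Int.ofStr? (left ++ String.ofList cur.reverse)).getD 0
      if num < limit then results ++ [num] else results
  | n + 1, cur, results =>
      pvDigitsA.foldl
        (fun acc d =>
          if cur.length == 0 && d == '0' then acc
          else pvBacktrackA limit n (cur ++ [d]) acc)
        results

def generate_even_palindromes (limit : Int) : List Int :=
  let max_len : Int := (PySem.Int.toStr limit).length
  (PySem.List.pyRange 2 (max_len + 1) 2).foldl
    (fun results length =>
      let half_len := PySem.Int.floordiv length 2
      -- half_len ≥ 1 for every length the range produces; .toNat is exact there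
      pvBacktrackA limit half_len.toNat [] results)
    []

-- ===== PORT B =====
-- the characters of the string '02468'
def pvEvenDigitsB : List Char := ['0', '2', '4', '6', '8']

def generate_even_palindromes_alt (limit : Int) : List Int :=
  let max_len : Int := (PySem.Int.toStr limit).length
  (PySem.List.pyRange 2 (max_len + 1) 2).foldl
    (fun results length =>
      let half_len := PySem.Int.floordiv length 2
      -- halves = ['2','4','6','8']; then half_len-1 rounds of cartesian extension
      let halves :=
        (PySem.List.pyRange 0 (half_len - 1) 1).foldl
          (fun hs _ => hs.flatMap (fun h => pvEvenDigitsB.map (fun d => h ++ [d])))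
          [['2'], ['4'], ['6'], ['8']]
      halves.foldl
        (fun res left =>
          let num := (PySem.Int.ofStr? (String.ofList left ++ String.ofList left.reverse)).getD 0
          if num < limit then res ++ [num] else res)
        results)
    []

-- ===== PRECONDITION & SPEC =====
def Spec_generate_even_palindromes (limit : Int) (out : List Int) : Prop := out = generate_even_palindromes_alt limit
instance (limit : Int) (out : List Int) : Decidable (Spec_generate_even_palindromes limit out) := by unfold Spec_generate_even_palindromes; infer_instance

-- ===== CLAIM (what is proved, stated in full; the proofs are below) =====
def Claim_equal_generate_even_palindromes : Prop := ∀ (limit : Int), Dom_generate_even_palindromes limit → Spec_generate_even_palindromes limit (generate_even_palindromes limit)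

-- ===== LEMMAS AND PROOFS =====

-- the common leaf step: form the palindrome from a left half and filter it
def pvStep (limit : Int) (left : List Char) (res : List Int) : List Int :=
  let num := (PySem.Int.ofStr? (String.ofList left ++ String.ofList left.reverse)).getD 0
  if num < limit then res ++ [num] else res

-- all digit tuples of length n, built by PREPENDING (A's recursion order)
def pvTupL : Nat → List (List Char)
  | 0 => [[]]
  | n + 1 => pvDigitsA.flatMap (fun d => (pvTupL n).map (d :: ·))

-- all digit tuples of length n, built by APPENDING (B's construction order)
def pvTupR : Nat → List (List Char)
  | 0 => [[]]
  | n + 1 => (pvTupR n).flatMap (fun t => pvDigitsA.map (fun d => t ++ [d]))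

theorem pvFoldl_flatMap {α β γ : Type} (l : List α) (g : α → List β)
    (f : γ → β → γ) (init : γ) :
    (l.flatMap g).foldl f init = l.foldl (fun a x => (g x).foldl f a) init := by
  induction l generalizing init with
  | nil => rfl
  | cons x xs ih => simp [List.flatMap_cons, List.foldl_append, ih]

theorem pvTupR_succ_left (n : Nat) :
    pvTupR (n + 1) = pvDigitsA.flatMap (fun d => (pvTupR n).map (d :: ·)) := by
  induction n with
  | zero => decide
  | succ n ih =>
      conv_lhs => rw [show pvTupR (n + 2) = (pvTupR (n+1)).flatMap (fun t => pvDigitsA.map (fun d => t ++ [d])) from rfl, ih]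
      rw [show pvTupR (n + 1) = (pvTupR n).flatMap (fun t => pvDigitsA.map (fun d => t ++ [d])) from rfl]
      simp [List.flatMap_assoc, List.map_flatMap, List.flatMap_map, List.map_map, Function.comp_def]

theorem pvTupL_eq_pvTupR (n : Nat) : pvTupL n = pvTupR n := by
  induction n with
  | zero => rfl
  | succ n ih => rw [pvTupL, ih, pvTupR_succ_left]

-- backtracking from a nonempty prefix enumerates exactly the pvTupL-extensions, in order
theorem pvBacktrackA_char (limit : Int) (n : Nat) :
    ∀ (cur : List Char) (res : List Int), cur ≠ [] →
      pvBacktrackA limit n cur res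
        = (pvTupL n).foldl (fun a t => pvStep limit (cur ++ t) a) res := by
  induction n with
  | zero =>
      intro cur res _
      simp [pvBacktrackA, pvTupL, pvStep]
  | succ n ih =>
      intro cur res hcur
      have hlen : (cur.length == 0) = false := by
        simp [List.length_eq_zero_iff, hcur]
      have hfun : (fun (acc : List Int) (d : Char) =>
            if cur.length == 0 && d == '0' then acc
            else pvBacktrackA limit n (cur ++ [d]) acc)
          = fun acc d => (pvTupL n).foldl (fun a t => pvStep limit ((cur ++ [d]) ++ t) a) acc := by
        funext acc d
        rw [hlen]
        simp only [Bool.false_and, Bool.false_eq_true, if_false]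
        exact ih (cur ++ [d]) acc (by simp)
      rw [pvBacktrackA, hfun, pvTupL, pvFoldl_flatMap]
      simp [List.foldl_map, List.append_assoc]

-- applying a constant step k times via foldl over any list of length k is iteration
theorem pvFoldl_const {α β : Type} (l : List α) (g : β → β) (init : β) :
    l.foldl (fun b _ => g b) init = g^[l.length] init := by
  induction l generalizing init with
  | nil => rfl
  | cons x xs ih => simp [List.foldl_cons, ih, Function.iterate_succ_apply]

def pvExtB (hs : List (List Char)) : List (List Char) :=
  hs.flatMap (fun h => pvEvenDigitsB.map (fun d => h ++ [d]))

-- k rounds of cartesian extension of the seeds = every seed followed by every k-tuple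
theorem pvExtB_iterate (k : Nat) (seeds : List (List Char)) :
    pvExtB^[k] seeds = seeds.flatMap (fun s => (pvTupR k).map (s ++ ·)) := by
  induction k with
  | zero => simp [pvTupR]
  | succ k ih =>
      rw [Function.iterate_succ_apply', ih]
      show (seeds.flatMap fun s => (pvTupR k).map (s ++ ·)).flatMap
          (fun h => pvEvenDigitsB.map (fun d => h ++ [d]))
        = seeds.flatMap fun s => (pvTupR (k+1)).map (s ++ ·)
      rw [show pvTupR (k + 1) = (pvTupR k).flatMap (fun t => pvDigitsA.map (fun d => t ++ [d])) from rfl]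
      simp [List.flatMap_assoc, List.map_flatMap, List.flatMap_map,
        pvEvenDigitsB, pvDigitsA, List.append_assoc]

-- the two per-length bodies agree whenever half_len ≥ 1 (always, inside the range)
theorem pvBody_eq (limit : Int) (h : Nat) (res : List Int) :
    pvBacktrackA limit (h + 1) [] res
      = (pvExtB^[h] [['2'], ['4'], ['6'], ['8']]).foldl
          (fun a left => pvStep limit left a) res := by
  rw [pvExtB_iterate]
  rw [pvBacktrackA]
  have hb : ∀ (d : Char) (acc : List Int), d ≠ '0' →
      (if ([] : List Char).length == 0 && d == '0' then acc
       else pvBacktrackA limit h ([] ++ [d]) acc)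
        = (pvTupR h).foldl (fun a t => pvStep limit (d :: t) a) acc := by
    intro d acc hd
    have : (d == '0') = false := by simp [hd]
    rw [this]
    simp only [Bool.and_false, Bool.false_eq_true, if_false, List.nil_append]
    rw [pvBacktrackA_char limit h [d] acc (by simp), pvTupL_eq_pvTupR]
    simp
  rw [pvFoldl_flatMap]
  simp only [List.foldl_map]
  show List.foldl _ res pvDigitsA = _
  simp only [pvDigitsA, List.foldl_cons, List.foldl_nil]
  rw [show (if ([] : List Char).length == 0 && ('0' == '0') then res else
      pvBacktrackA limit h ([] ++ ['0']) res) = res by simp]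
  rw [hb '2' _ (by decide), hb '4' _ (by decide), hb '6' _ (by decide), hb '8' _ (by decide)]
  simp

-- ===== VERDICT (by name: the statement is the Claim_ definition above) =====
theorem generate_even_palindromes_spec : Claim_equal_generate_even_palindromes := by
  intro limit _
  unfold Spec_generate_even_palindromes
  simp only [generate_even_palindromes, generate_even_palindromes_alt]
  refine PySem.List.foldl_congr_mem _ _ _ _ ?_
  intro res length hmem
  obtain ⟨h2, -, -⟩ :=
    (PySem.List.mem_pyRange_iff_of_pos (by norm_num : (0:Int) < 2) length).mp hmem
  have hlediv : PySem.Int.floordiv length 2 = length / 2 :=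
    PySem.Int.floordiv_eq_ediv_of_pos (by norm_num)
  have hl1 : 1 ≤ PySem.Int.floordiv length 2 := by rw [hlediv]; omega
  have hhalves :
      (PySem.List.pyRange 0 (PySem.Int.floordiv length 2 - 1) 1).foldl
          (fun hs _ => hs.flatMap (fun h => pvEvenDigitsB.map (fun d => h ++ [d])))
          [['2'], ['4'], ['6'], ['8']]
        = pvExtB^[(PySem.Int.floordiv length 2).toNat - 1] [['2'], ['4'], ['6'], ['8']] := by
    rw [show (fun (hs : List (List Char)) (_ : Int) =>
          hs.flatMap (fun h => pvEvenDigitsB.map (fun d => h ++ [d])))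
        = (fun hs (_ : Int) => pvExtB hs) from rfl]
    rw [pvFoldl_const, PySem.List.length_pyRange_one,
      show ((PySem.Int.floordiv length 2 - 1 - 0).toNat)
          = (PySem.Int.floordiv length 2).toNat - 1 from by omega]
  rw [hhalves,
    show (PySem.Int.floordiv length 2).toNat
        = ((PySem.Int.floordiv length 2).toNat - 1) + 1 from by omega,
    pvBody_eq]
  rfl
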